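-- pv_equiv track=rewrite | github.com/parsadlr/face-diet-gui | face_utils.py | _landmark_groups_106
-- ===== SOURCE A (Python) =====
-- from typing import List, Optional, Tuple
--
-- def _landmark_groups_106(num_points: int) -> List[Tuple[List[int], Tuple[int, int, int]]]:
--     # Approximate grouping for InsightFace 106 points. Indices may vary by model.
--     # We guard by num_points and clamp.
--     groups = [
--         (list(range(0, 33)), (0, 255, 0)),            # face contour
--         (list(range(33, 39)), (0, 165, 255)),         # left eyebrow
--         (list(range(39, 45)), (0, 140, 255)),         # right eyebrow
--         (list(range(45, 55)), (255, 0, 0)),           # nose bridge/base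
--         (list(range(55, 61)), (255, 100, 0)),         # nose/nostrils detail
--         (list(range(61, 69)), (255, 0, 255)),         # left eye
--         (list(range(69, 77)), (180, 0, 255)),         # right eye
--         (list(range(77, 89)), (0, 0, 255)),           # mouth outer
--         (list(range(89, 106)), (128, 0, 128)),        # mouth inner/extra points
--     ]
--     clamped: List[Tuple[List[int], Tuple[int, int, int]]] = []
--     max_idx = num_points - 1
--     for idxs, color in groups:
--         filtered = [i for i in idxs if 0 <= i <= max_idx]
--         if filtered:
--             clamped.append((filtered, color))
--     return clamped
-- ===== SOURCE B (Python) =====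
-- from typing import List, Tuple
--
-- def _landmark_groups_106(num_points: int) -> List[Tuple[List[int], Tuple[int, int, int]]]:
--     # Flat per-index color table for the 106 canonical points, then one pass of
--     # run-length grouping: consecutive indices with the same color form a group.
--     palette = [
--         (33, (0, 255, 0)),
--         (6, (0, 165, 255)),
--         (6, (0, 140, 255)),
--         (10, (255, 0, 0)),
--         (6, (255, 100, 0)),
--         (8, (255, 0, 255)),
--         (8, (180, 0, 255)),
--         (12, (0, 0, 255)),
--         (17, (128, 0, 128)),
--     ]
--     color_at: List[Tuple[int, int, int]] = []
--     for count, color in palette: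
--         color_at.extend([color] * count)
--     n = min(max(num_points, 0), len(color_at))
--     groups: List[Tuple[List[int], Tuple[int, int, int]]] = []
--     for i, c in enumerate(color_at[:n]):
--         if groups and groups[-1][1] == c:
--             groups[-1][0].append(i)
--         else:
--             groups.append(([i], c))
--     return groups
-- ===== Notes on version B (the rewrite author's own statement) =====
-- stated objective: alternative
-- what changed: Instead of filtering each precomputed index list of the group table against the valid index range, B builds a flat per-index color table from (count, color) run lengths and reconstructs the groups by a single run-length-grouping pass over the first clamp(num_points) entries; groups emerge from color changes, not from the per-group filter loop.
import Mathlib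
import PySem

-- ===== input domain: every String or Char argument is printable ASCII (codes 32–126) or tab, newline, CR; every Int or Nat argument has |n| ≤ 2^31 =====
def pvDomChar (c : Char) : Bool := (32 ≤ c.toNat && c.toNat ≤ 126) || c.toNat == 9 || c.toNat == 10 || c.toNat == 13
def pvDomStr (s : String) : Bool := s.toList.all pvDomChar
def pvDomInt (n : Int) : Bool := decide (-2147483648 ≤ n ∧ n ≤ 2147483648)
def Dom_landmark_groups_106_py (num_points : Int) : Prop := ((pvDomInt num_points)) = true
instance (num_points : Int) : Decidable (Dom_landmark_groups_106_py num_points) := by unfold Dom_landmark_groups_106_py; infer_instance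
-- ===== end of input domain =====

-- B replaces A's per-group index filtering by a flat per-index color table and one
-- run-length-grouping pass over the first clamp(num_points) indices (alternative decomposition).

-- ===== PORT A =====
-- the constant `groups` list of A, built with list(range(a, b))
def pvGroupsA : List (List Int × (Int × Int × Int)) :=
  [ (PySem.List.pyRange 0 33 1, (0, 255, 0)),
    (PySem.List.pyRange 33 39 1, (0, 165, 255)),
    (PySem.List.pyRange 39 45 1, (0, 140, 255)),
    (PySem.List.pyRange 45 55 1, (255, 0, 0)),
    (PySem.List.pyRange 55 61 1, (255, 100, 0)),
    (PySem.List.pyRange 61 69 1, (255, 0, 255)),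
    (PySem.List.pyRange 69 77 1, (180, 0, 255)),
    (PySem.List.pyRange 77 89 1, (0, 0, 255)),
    (PySem.List.pyRange 89 106 1, (128, 0, 128)) ]

def landmark_groups_106_py (num_points : Int) : List (List Int × (Int × Int × Int)) :=
  let max_idx := num_points - 1
  pvGroupsA.foldl
    (fun clamped p =>
      let filtered := p.1.filter (fun i => decide (0 ≤ i ∧ i ≤ max_idx))
      if filtered ≠ [] then clamped ++ [(filtered, p.2)] else clamped)
    []

-- ===== PORT B =====
-- the constant `palette` list of B: (count, color)
def pvPaletteB : List (Nat × (Int × Int × Int)) :=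
  [ (33, (0, 255, 0)),
    (6, (0, 165, 255)),
    (6, (0, 140, 255)),
    (10, (255, 0, 0)),
    (6, (255, 100, 0)),
    (8, (255, 0, 255)),
    (8, (180, 0, 255)),
    (12, (0, 0, 255)),
    (17, (128, 0, 128)) ]

def landmark_groups_106_py_alt (num_points : Int) : List (List Int × (Int × Int × Int)) :=
  let color_at := pvPaletteB.foldl (fun acc p => acc ++ List.replicate p.1 p.2) []
  let n := min (max num_points 0) (color_at.length : Int)
  (PySem.List.enumerate (PySem.List.slice color_at none (some n))).foldl
    (fun groups ic =>
      match groups.getLast? with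
      | some last =>
          if last.2 = ic.2 then groups.dropLast ++ [(last.1 ++ [ic.1], last.2)]
          else groups ++ [([ic.1], ic.2)]
      | none => groups ++ [([ic.1], ic.2)])
    []

-- ===== PRECONDITION & SPEC =====
def Spec_landmark_groups_106_py (num_points : Int) (out : List (List Int × (Int × Int × Int))) : Prop := out = landmark_groups_106_py_alt num_points
instance (num_points : Int) (out : List (List Int × (Int × Int × Int))) : Decidable (Spec_landmark_groups_106_py num_points out) := by unfold Spec_landmark_groups_106_py; infer_instance

-- ===== CLAIM (what is proved, stated in full; the proofs are below) =====
def Claim_equal_landmark_groups_106_py : Prop := ∀ (num_points : Int), Dom_landmark_groups_106_py num_points → Spec_landmark_groups_106_py num_points (landmark_groups_106_py num_points)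

-- ===== LEMMAS AND PROOFS =====

-- A's result depends only on the clamp of num_points to [0, 106]:
-- each group's filter predicate agrees pointwise on the range's members (0 ≤ i < 106).
theorem pv_filter_clamp (s e n : Int) (_h0 : 0 ≤ s) (he : e ≤ 106) :
    (PySem.List.pyRange s e 1).filter (fun i => decide (0 ≤ i ∧ i ≤ n - 1))
      = (PySem.List.pyRange s e 1).filter
          (fun i => decide (0 ≤ i ∧ i ≤ min (max n 0) 106 - 1)) := by
  apply List.filter_congr
  intro i hi
  rw [PySem.List.mem_pyRange_one] at hi
  rw [decide_eq_decide]
  omega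

theorem pv_A_clamp (n : Int) :
    landmark_groups_106_py n = landmark_groups_106_py (min (max n 0) 106) := by
  unfold landmark_groups_106_py pvGroupsA
  simp only [List.foldl]
  rw [pv_filter_clamp 0 33 n (by omega) (by omega),
      pv_filter_clamp 33 39 n (by omega) (by omega),
      pv_filter_clamp 39 45 n (by omega) (by omega),
      pv_filter_clamp 45 55 n (by omega) (by omega),
      pv_filter_clamp 55 61 n (by omega) (by omega),
      pv_filter_clamp 61 69 n (by omega) (by omega),
      pv_filter_clamp 69 77 n (by omega) (by omega),
      pv_filter_clamp 77 89 n (by omega) (by omega),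
      pv_filter_clamp 89 106 n (by omega) (by omega)]

theorem pv_B_clamp (n : Int) :
    landmark_groups_106_py_alt n = landmark_groups_106_py_alt (min (max n 0) 106) := by
  have hlen : (pvPaletteB.foldl (fun acc p => acc ++ List.replicate p.1 p.2) []).length = 106 := by decide
  simp only [landmark_groups_106_py_alt, hlen]
  norm_num

set_option maxRecDepth 40000 in
theorem pv_fin_eq : ∀ m : Fin 107, landmark_groups_106_py (m : Int) = landmark_groups_106_py_alt (m : Int) := by decide

-- ===== VERDICT (by name: the statement is the Claim_ definition above) =====
theorem landmark_groups_106_py_spec : Claim_equal_landmark_groups_106_py := by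
  intro n _
  unfold Spec_landmark_groups_106_py
  rw [pv_A_clamp, pv_B_clamp]
  set c : Int := min (max n 0) 106 with hc
  have hb : 0 ≤ c ∧ c ≤ 106 := by omega
  have := pv_fin_eq ⟨c.toNat, by omega⟩
  simpa [Int.toNat_of_nonneg hb.1] using this
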